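-- pv_equiv track=rewrite | github.com/xenon-creator/Sentinel-Scan | backend/plugins/zap/zap_parser.py | build_severity_summary
-- ===== SOURCE A (Python) =====
-- from typing import Any, Dict, List, Optional
--
-- def build_severity_summary(
--     findings: List[Dict[str, Any]]
-- ) -> Dict[str, int]:
--     """
--     Build a severity breakdown from parsed findings.
--
--     Returns:
--         Dict mapping severity levels to counts.
--     """
--     summary = {"critical": 0, "high": 0, "medium": 0, "low": 0, "info": 0}
--     for finding in findings:
--         severity = finding.get("severity", "info").lower()
--         if severity in summary:
--             summary[severity] += 1
--     return summary
-- ===== SOURCE B (Python) =====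
-- from typing import Any, Dict, List
--
-- LEVELS = ("critical", "high", "medium", "low", "info")
--
--
-- def _counts(fs):
--     """Divide-and-conquer: count vector for a slice of findings."""
--     if not fs:
--         return (0, 0, 0, 0, 0)
--     if len(fs) == 1:
--         s = fs[0].get("severity", "info").lower()
--         return tuple(1 if s == k else 0 for k in LEVELS)
--     mid = len(fs) // 2
--     a = _counts(fs[:mid])
--     b = _counts(fs[mid:])
--     return tuple(x + y for x, y in zip(a, b))
--
--
-- def build_severity_summary(
--     findings: List[Dict[str, Any]]
-- ) -> Dict[str, int]:
--     """
--     Build a severity breakdown from parsed findings.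
--
--     Returns:
--         Dict mapping severity levels to counts.
--     """
--     return dict(zip(LEVELS, _counts(findings)))
-- ===== Notes on version B (the rewrite author's own statement) =====
-- stated objective: alternative
-- what changed: Replaces A's single-pass mutate-a-counter-dict loop with a divide-and-conquer recursion: each leaf maps a finding to a 0/1 indicator vector over the five fixed levels, halves are combined by componentwise vector addition, and the final count vector is zipped with the fixed key order.
import Mathlib
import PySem

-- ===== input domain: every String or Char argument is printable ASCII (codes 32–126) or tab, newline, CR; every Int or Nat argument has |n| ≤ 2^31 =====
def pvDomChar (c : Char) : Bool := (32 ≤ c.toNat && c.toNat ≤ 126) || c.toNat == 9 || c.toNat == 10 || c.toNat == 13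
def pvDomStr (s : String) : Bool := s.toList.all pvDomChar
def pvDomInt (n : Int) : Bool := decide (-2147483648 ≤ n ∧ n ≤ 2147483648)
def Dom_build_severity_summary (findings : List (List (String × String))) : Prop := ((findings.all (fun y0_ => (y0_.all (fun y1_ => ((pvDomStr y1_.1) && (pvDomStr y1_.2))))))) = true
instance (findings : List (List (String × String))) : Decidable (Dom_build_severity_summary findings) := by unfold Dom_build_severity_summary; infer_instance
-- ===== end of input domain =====

-- B replaces A's single-pass counter-dict loop by a divide-and-conquer recursion over the list
-- (leaf = indicator vector, merge = componentwise addition), then zips with the fixed key order (alternative; same O(n) cost).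

-- ===== PORT A =====
-- finding.get("severity", "info").lower()
def pvSevOf (f : List (String × String)) : String :=
  PySem.Str.lower (PySem.Dict.getD (PySem.Dict.ofList f) "severity" "info")

def build_severity_summary (findings : List (List (String × String))) : List (String × Int) :=
  let summary : PySem.Dict String Int :=
    PySem.Dict.ofList [("critical", 0), ("high", 0), ("medium", 0), ("low", 0), ("info", 0)]
  (findings.foldl (fun s f =>
      let severity := pvSevOf f
      if s.contains severity then s.insert severity (s.getD severity 0 + 1) else s) summary).items

-- ===== PORT B =====
-- leaf case of _counts: tuple(1 if s == k else 0 for k in LEVELS)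
def pvIndicator (f : List (String × String)) : Int × Int × Int × Int × Int :=
  let s := pvSevOf f
  ((if s = "critical" then 1 else 0), (if s = "high" then 1 else 0), (if s = "medium" then 1 else 0),
   (if s = "low" then 1 else 0), (if s = "info" then 1 else 0))

-- _counts: divide and conquer, halves combined by componentwise addition
def pvCounts : List (List (String × String)) → Int × Int × Int × Int × Int
  | [] => (0, 0, 0, 0, 0)
  | [f] => pvIndicator f
  | f :: g :: rest =>
      let l := f :: g :: rest
      let mid := l.length / 2
      let a := pvCounts (l.take mid)
      let b := pvCounts (l.drop mid)
      (a.1 + b.1, a.2.1 + b.2.1, a.2.2.1 + b.2.2.1, a.2.2.2.1 + b.2.2.2.1, a.2.2.2.2 + b.2.2.2.2)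
termination_by l => l.length
decreasing_by
  · simp [List.length_take]; omega
  · simp; omega

-- dict(zip(LEVELS, _counts(findings)))
def build_severity_summary_alt (findings : List (List (String × String))) : List (String × Int) :=
  let c := pvCounts findings
  [("critical", c.1), ("high", c.2.1), ("medium", c.2.2.1), ("low", c.2.2.2.1), ("info", c.2.2.2.2)]

-- ===== PRECONDITION & SPEC =====
def Spec_build_severity_summary (findings : List (List (String × String))) (out : List (String × Int)) : Prop := out = build_severity_summary_alt findings
instance (findings : List (List (String × String))) (out : List (String × Int)) : Decidable (Spec_build_severity_summary findings out) := by unfold Spec_build_severity_summary; infer_instance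

-- ===== CLAIM (what is proved, stated in full; the proofs are below) =====
def Claim_equal_build_severity_summary : Prop := ∀ (findings : List (List (String × String))), Dom_build_severity_summary findings → Spec_build_severity_summary findings (build_severity_summary findings)

-- ===== LEMMAS AND PROOFS =====

-- B's divide-and-conquer recursion computes the per-level counts of the lowered severities.
lemma pvCounts_eq (l : List (List (String × String))) :
    pvCounts l = (((l.map pvSevOf).count "critical" : Int), ((l.map pvSevOf).count "high" : Int),
      ((l.map pvSevOf).count "medium" : Int), ((l.map pvSevOf).count "low" : Int), ((l.map pvSevOf).count "info" : Int)) := by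
  induction l using pvCounts.induct with
  | case1 => simp [pvCounts]
  | case2 f =>
    simp only [pvCounts, pvIndicator, List.map_cons, List.map_nil, List.count_cons, List.count_nil]
    by_cases h1 : pvSevOf f = "critical" <;> by_cases h2 : pvSevOf f = "high" <;>
      by_cases h3 : pvSevOf f = "medium" <;> by_cases h4 : pvSevOf f = "low" <;>
      by_cases h5 : pvSevOf f = "info" <;> simp_all
  | case3 f g rest l' mid' ih1 ih2 =>
    rw [pvCounts, ih1, ih2]
    have h : ∀ k : String, ((List.map pvSevOf l').take mid').count k + ((List.map pvSevOf l').drop mid').count k = (List.map pvSevOf (f :: g :: rest)).count k := by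
      intro k
      conv_rhs => rw [show List.map pvSevOf (f :: g :: rest) = List.map pvSevOf l' from rfl,
        ← List.take_append_drop mid' (List.map pvSevOf l')]
      rw [List.count_append]
    simp only [List.map_take, List.map_drop, Prod.mk.injEq]
    refine ⟨?_, ?_, ?_, ?_, ?_⟩ <;> rw [← Nat.cast_add, h]

-- A's foldl over the counter dict: items = fixed keys with initial value plus per-level count.
lemma pv_items_fold (l : List (List (String × String))) (a b c d e : Int) :
    (l.foldl (fun s f =>
        let severity := pvSevOf f
        if s.contains severity then s.insert severity (s.getD severity 0 + 1) else s)
        (PySem.Dict.ofList [("critical", a), ("high", b), ("medium", c), ("low", d), ("info", e)])).items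
    = [("critical", a + (l.map pvSevOf).count "critical"), ("high", b + (l.map pvSevOf).count "high"), ("medium", c + (l.map pvSevOf).count "medium"), ("low", d + (l.map pvSevOf).count "low"), ("info", e + (l.map pvSevOf).count "info")] := by
  induction l generalizing a b c d e with
  | nil =>
    show (PySem.Dict.ofList [("critical", a), ("high", b), ("medium", c), ("low", d), ("info", e)]).items = _
    simp [PySem.Dict.ofList, PySem.Dict.update, PySem.Dict.items_insert, PySem.Dict.contains_insert, PySem.Dict.empty]
  | cons x l ih =>
    simp only [List.foldl_cons, List.map_cons, List.count_cons]
    by_cases h1 : pvSevOf x = "critical"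
    · rw [show (let severity := pvSevOf x;
        if (PySem.Dict.ofList [("critical", a), ("high", b), ("medium", c), ("low", d), ("info", e)]).contains severity = true
        then (PySem.Dict.ofList [("critical", a), ("high", b), ("medium", c), ("low", d), ("info", e)]).insert severity ((PySem.Dict.ofList [("critical", a), ("high", b), ("medium", c), ("low", d), ("info", e)]).getD severity 0 + 1)
        else PySem.Dict.ofList [("critical", a), ("high", b), ("medium", c), ("low", d), ("info", e)])
        = PySem.Dict.ofList [("critical", a + 1), ("high", b), ("medium", c), ("low", d), ("info", e)] by rw [show pvSevOf x = "critical" from h1]; rfl]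
      rw [ih]
      simp [h1]
      omega
    by_cases h2 : pvSevOf x = "high"
    · rw [show (let severity := pvSevOf x;
        if (PySem.Dict.ofList [("critical", a), ("high", b), ("medium", c), ("low", d), ("info", e)]).contains severity = true
        then (PySem.Dict.ofList [("critical", a), ("high", b), ("medium", c), ("low", d), ("info", e)]).insert severity ((PySem.Dict.ofList [("critical", a), ("high", b), ("medium", c), ("low", d), ("info", e)]).getD severity 0 + 1)
        else PySem.Dict.ofList [("critical", a), ("high", b), ("medium", c), ("low", d), ("info", e)])
        = PySem.Dict.ofList [("critical", a), ("high", b + 1), ("medium", c), ("low", d), ("info", e)] by rw [show pvSevOf x = "high" from h2]; rfl]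
      rw [ih]
      simp [h2]
      omega
    by_cases h3 : pvSevOf x = "medium"
    · rw [show (let severity := pvSevOf x;
        if (PySem.Dict.ofList [("critical", a), ("high", b), ("medium", c), ("low", d), ("info", e)]).contains severity = true
        then (PySem.Dict.ofList [("critical", a), ("high", b), ("medium", c), ("low", d), ("info", e)]).insert severity ((PySem.Dict.ofList [("critical", a), ("high", b), ("medium", c), ("low", d), ("info", e)]).getD severity 0 + 1)
        else PySem.Dict.ofList [("critical", a), ("high", b), ("medium", c), ("low", d), ("info", e)])
        = PySem.Dict.ofList [("critical", a), ("high", b), ("medium", c + 1), ("low", d), ("info", e)] by rw [show pvSevOf x = "medium" from h3]; rfl]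
      rw [ih]
      simp [h3]
      omega
    by_cases h4 : pvSevOf x = "low"
    · rw [show (let severity := pvSevOf x;
        if (PySem.Dict.ofList [("critical", a), ("high", b), ("medium", c), ("low", d), ("info", e)]).contains severity = true
        then (PySem.Dict.ofList [("critical", a), ("high", b), ("medium", c), ("low", d), ("info", e)]).insert severity ((PySem.Dict.ofList [("critical", a), ("high", b), ("medium", c), ("low", d), ("info", e)]).getD severity 0 + 1)
        else PySem.Dict.ofList [("critical", a), ("high", b), ("medium", c), ("low", d), ("info", e)])
        = PySem.Dict.ofList [("critical", a), ("high", b), ("medium", c), ("low", d + 1), ("info", e)] by rw [show pvSevOf x = "low" from h4]; rfl]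
      rw [ih]
      simp [h4]
      omega
    by_cases h5 : pvSevOf x = "info"
    · rw [show (let severity := pvSevOf x;
        if (PySem.Dict.ofList [("critical", a), ("high", b), ("medium", c), ("low", d), ("info", e)]).contains severity = true
        then (PySem.Dict.ofList [("critical", a), ("high", b), ("medium", c), ("low", d), ("info", e)]).insert severity ((PySem.Dict.ofList [("critical", a), ("high", b), ("medium", c), ("low", d), ("info", e)]).getD severity 0 + 1)
        else PySem.Dict.ofList [("critical", a), ("high", b), ("medium", c), ("low", d), ("info", e)])
        = PySem.Dict.ofList [("critical", a), ("high", b), ("medium", c), ("low", d), ("info", e + 1)] by rw [show pvSevOf x = "info" from h5]; rfl]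
      rw [ih]
      simp [h5]
      omega
    · rw [show (let severity := pvSevOf x;
        if (PySem.Dict.ofList [("critical", a), ("high", b), ("medium", c), ("low", d), ("info", e)]).contains severity = true
        then (PySem.Dict.ofList [("critical", a), ("high", b), ("medium", c), ("low", d), ("info", e)]).insert severity ((PySem.Dict.ofList [("critical", a), ("high", b), ("medium", c), ("low", d), ("info", e)]).getD severity 0 + 1)
        else PySem.Dict.ofList [("critical", a), ("high", b), ("medium", c), ("low", d), ("info", e)])
        = PySem.Dict.ofList [("critical", a), ("high", b), ("medium", c), ("low", d), ("info", e)] by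
        have hc : (PySem.Dict.ofList [("critical", a), ("high", b), ("medium", c), ("low", d), ("info", e)]).contains (pvSevOf x) = false := by
          simp [PySem.Dict.ofList, PySem.Dict.update, PySem.Dict.contains_insert, PySem.Dict.contains_empty, h1, h2, h3, h4, h5]
        simp [hc]]
      rw [ih]
      simp [h1, h2, h3, h4, h5]

-- ===== VERDICT (by name: the statement is the Claim_ definition above) =====
theorem build_severity_summary_spec : Claim_equal_build_severity_summary := by
  intro findings _
  show build_severity_summary findings = build_severity_summary_alt findings
  rw [build_severity_summary_alt, pvCounts_eq]
  exact (pv_items_fold findings 0 0 0 0 0).trans (by simp)
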